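-- pv_equiv track=rewrite | github.com/elifesciences/sciencebeam-gym | sciencebeam_gym/alignment/WordSequenceMatcher.py | split_with_offset
-- ===== SOURCE A (Python) =====
-- def split_with_offset(s, sep):
--   previous_start = 0
--   tokens = []
--   for i, c in enumerate(s):
--     if c in sep:
--       if previous_start < i:
--         tokens.append((previous_start, s[previous_start:i]))
--       previous_start = i + 1
--   if previous_start < len(s):
--     tokens.append((previous_start, s[previous_start:]))
--   return tokens
-- ===== SOURCE B (Python) =====
-- def split_with_offset(s, sep):
--     # Skip/scan two-pointer: skip separator chars, then scan out a whole
--     # run (token) at once, instead of enumerate + previous_start bookkeeping.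
--     tokens = []
--     i = 0
--     n = len(s)
--     while i < n:
--         if s[i] in sep:
--             i += 1
--         else:
--             j = i
--             while j < n and s[j] not in sep:
--                 j += 1
--             tokens.append((i, s[i:j]))
--             i = j
--     return tokens
-- ===== Notes on version B (the rewrite author's own statement) =====
-- stated objective: alternative
-- what changed: Replaces the enumerate loop with previous_start bookkeeping and a post-loop flush by a two-pointer skip/scan loop that skips separators and extracts each whole token run at once.
import Mathlib
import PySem

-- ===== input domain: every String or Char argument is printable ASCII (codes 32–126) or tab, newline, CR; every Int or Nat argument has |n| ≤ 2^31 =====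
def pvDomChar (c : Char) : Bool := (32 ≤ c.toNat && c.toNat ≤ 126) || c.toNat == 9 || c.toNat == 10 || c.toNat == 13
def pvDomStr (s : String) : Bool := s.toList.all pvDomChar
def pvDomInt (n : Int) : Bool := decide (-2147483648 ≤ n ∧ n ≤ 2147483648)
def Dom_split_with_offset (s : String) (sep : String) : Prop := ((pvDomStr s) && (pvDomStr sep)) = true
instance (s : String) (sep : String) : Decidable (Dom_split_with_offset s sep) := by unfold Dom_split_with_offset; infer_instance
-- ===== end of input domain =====

-- B replaces A's enumerate-with-previous_start bookkeeping by a two-pointer skip/scan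
-- loop that extracts each whole token run at once (alternative decomposition, same cost).


-- ===== PORT A =====
-- loop body of A: for i, c in enumerate(s); state = (previous_start, tokens)
def aStep (cs seps : List Char) (st : Int × List (Int × String)) (ic : Int × Char) :
    Int × List (Int × String) :=
  if ic.2 ∈ seps then
    (ic.1 + 1,
     if st.1 < ic.1 then st.2 ++ [(st.1, String.ofList (PySem.List.slice cs (some st.1) (some ic.1)))]
     else st.2)
  else st

-- post-loop flush of A: if previous_start < len(s): tokens.append((previous_start, s[previous_start:]))
def aFlush (cs : List Char) (st : Int × List (Int × String)) : List (Int × String) :=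
  if st.1 < (cs.length : Int) then
    st.2 ++ [(st.1, String.ofList (PySem.List.slice cs (some st.1) none))]
  else st.2

def split_with_offset (s : String) (sep : String) : List (Int × String) :=
  aFlush s.toList
    ((PySem.List.enumerate s.toList 0).foldl (aStep s.toList sep.toList) (0, []))

-- ===== PORT B =====
-- inner while loop of Source B: scan out the maximal non-separator run and the remainder
def altScan (seps : List Char) : List Char → List Char × List Char
  | [] => ([], [])
  | c :: rest =>
    if c ∈ seps then ([], c :: rest)
    else
      let p := altScan seps rest
      (c :: p.1, p.2)

lemma altScan_snd_length_le (seps : List Char) (l : List Char) :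
    (altScan seps l).2.length ≤ l.length := by
  induction l with
  | nil => simp [altScan]
  | cons c rest ih =>
    simp only [altScan]; split
    · simp
    · simpa using Nat.le_succ_of_le ih

-- outer while loop of Source B: skip separator chars, emit whole runs with their offsets
def altGo (seps : List Char) (i : Int) : List Char → List (Int × String)
  | [] => []
  | c :: rest =>
    if c ∈ seps then altGo seps (i + 1) rest
    else
      let p := altScan seps (c :: rest)
      (i, String.ofList p.1) :: altGo seps (i + p.1.length) p.2
termination_by l => l.length
decreasing_by
  · simp
  · rename_i hc
    simp only [altScan, if_neg hc]
    have := altScan_snd_length_le seps rest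
    simpa using Nat.lt_succ_of_le this

def split_with_offset_alt (s : String) (sep : String) : List (Int × String) :=
  altGo sep.toList 0 s.toList

-- ===== PRECONDITION & SPEC =====
def Spec_split_with_offset (s : String) (sep : String) (out : List (Int × String)) : Prop := out = split_with_offset_alt s sep
instance (s : String) (sep : String) (out : List (Int × String)) : Decidable (Spec_split_with_offset s sep out) := by unfold Spec_split_with_offset; infer_instance

-- ===== CLAIM (what is proved, stated in full; the proofs are below) =====
def Claim_equal_split_with_offset : Prop := ∀ (s : String) (sep : String), Dom_split_with_offset s sep → Spec_split_with_offset s sep (split_with_offset s sep)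

-- ===== LEMMAS AND PROOFS =====

lemma altGo_nil (seps : List Char) (i : Int) : altGo seps i [] = [] := by
  conv_lhs => unfold altGo

lemma altGo_cons (seps : List Char) (i : Int) (c : Char) (rest : List Char) :
    altGo seps i (c :: rest) = if c ∈ seps then altGo seps (i + 1) rest
      else (i, String.ofList (altScan seps (c :: rest)).1) ::
        altGo seps (i + (altScan seps (c :: rest)).1.length) (altScan seps (c :: rest)).2 := by
  conv_lhs => unfold altGo

lemma altScan_of_all_nonsep (seps : List Char) (l : List Char)
    (h : ∀ x ∈ l, x ∉ seps) : altScan seps l = (l, []) := by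
  induction l with
  | nil => rfl
  | cons c rest ih =>
    simp only [altScan, if_neg (h c List.mem_cons_self)]
    rw [ih (fun x hx => h x (List.mem_cons_of_mem _ hx))]

lemma altScan_append_sep (seps : List Char) (run rest : List Char) (c : Char)
    (hrun : ∀ x ∈ run, x ∉ seps) (hc : c ∈ seps) :
    altScan seps (run ++ c :: rest) = (run, c :: rest) := by
  induction run with
  | nil => simp [altScan, hc]
  | cons r tl ih =>
    simp only [List.cons_append, altScan, if_neg (hrun r List.mem_cons_self)]
    rw [ih (fun x hx => hrun x (List.mem_cons_of_mem _ hx))]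

-- B on a non-empty all-non-separator suffix: one token, the whole suffix
lemma altGo_all_nonsep (seps : List Char) (i : Int) (l : List Char) (hne : l ≠ [])
    (h : ∀ x ∈ l, x ∉ seps) :
    altGo seps i l = [(i, String.ofList l)] := by
  cases l with
  | nil => exact absurd rfl hne
  | cons c rest =>
    rw [altGo_cons, if_neg (h c List.mem_cons_self)]
    simp only [altScan_of_all_nonsep seps (c :: rest) h]
    rw [altGo_nil]

-- B on run ++ sep :: rest, run all-non-separator and non-empty: token (i, run), continue after the sep
lemma altGo_run_sep (seps : List Char) (i : Int) (run rest : List Char) (c : Char)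
    (hne : run ≠ []) (hrun : ∀ x ∈ run, x ∉ seps) (hc : c ∈ seps) :
    altGo seps i (run ++ c :: rest) =
      (i, String.ofList run) :: altGo seps (i + run.length + 1) rest := by
  cases run with
  | nil => exact absurd rfl hne
  | cons r tl =>
    rw [List.cons_append, altGo_cons, if_neg (hrun r List.mem_cons_self)]
    have hscan : altScan seps (r :: (tl ++ c :: rest)) = (r :: tl, c :: rest) := by
      rw [← List.cons_append]; exact altScan_append_sep seps (r :: tl) rest c hrun hc
    simp only [hscan]
    rw [altGo_cons, if_pos hc]

-- main invariant: A's loop over the suffix starting at index k, with previous_start = p and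
-- the pending chars cs[p:k) all non-separators, followed by the flush, produces
-- acc ++ (B's output from position p)
lemma key (cs seps : List Char) :
    ∀ (l : List Char) (k p : Nat) (acc : List (Int × String)),
      l = cs.drop k → p ≤ k → k ≤ cs.length →
      (∀ x ∈ (cs.drop p).take (k - p), x ∉ seps) →
      aFlush cs ((PySem.List.enumerate l (k : Int)).foldl (aStep cs seps) ((p : Int), acc))
        = acc ++ altGo seps (p : Int) (cs.drop p) := by
  intro l
  induction l with
  | nil =>
    intro k p acc hl hpk hkn hinv
    have hk : k = cs.length := by
      have := congrArg List.length hl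
      simp [List.length_drop] at this
      omega
    have hdp : (cs.drop p).length = cs.length - p := List.length_drop
    have htake : (cs.drop p).take (k - p) = cs.drop p := by
      apply List.take_of_length_le; omega
    rw [htake] at hinv
    simp only [PySem.List.enumerate_nil, List.foldl_nil, aFlush]
    by_cases hp : p < cs.length
    · rw [if_pos (by exact_mod_cast hp)]
      have hne : cs.drop p ≠ [] := by
        intro h; rw [h] at hdp; simp at hdp; omega
      rw [altGo_all_nonsep seps _ _ hne hinv, PySem.List.slice_from_natCast]
    · rw [if_neg (by exact_mod_cast hp)]
      have hnil : cs.drop p = [] := List.drop_eq_nil_of_le (by omega)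
      rw [hnil, altGo_nil]
      simp
  | cons c rest ih =>
    intro k p acc hl hpk hkn hinv
    have hklt : k < cs.length := by
      by_contra h
      have hnil : cs.drop k = [] := List.drop_eq_nil_of_le (by omega)
      rw [hnil] at hl
      exact (List.cons_ne_nil c rest) hl
    have hrest : cs.drop (k + 1) = rest := by
      have h1 : cs.drop (k + 1) = (cs.drop k).drop 1 := by rw [List.drop_drop]
      rw [h1, ← hl]; rfl
    have hrunlen : ((cs.drop p).take (k - p)).length = k - p := by
      rw [List.length_take, List.length_drop]; omega
    have h2 : (cs.drop p).drop (k - p) = c :: rest := by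
      rw [List.drop_drop]
      rw [show p + (k - p) = k from by omega, ← hl]
    have hsplit : cs.drop p = (cs.drop p).take (k - p) ++ c :: rest :=
      calc cs.drop p = (cs.drop p).take (k - p) ++ (cs.drop p).drop (k - p) :=
            (List.take_append_drop _ _).symm
        _ = (cs.drop p).take (k - p) ++ c :: rest := by rw [h2]
    rw [PySem.List.enumerate_cons, List.foldl_cons]
    by_cases hc : c ∈ seps
    · simp only [aStep, if_pos hc]
      by_cases hpklt : p < k
      · rw [if_pos (by exact_mod_cast hpklt)]
        have hcast : ((k : Int) + 1) = ((k + 1 : Nat) : Int) := by push_cast; ring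
        rw [hcast, ih (k + 1) (k + 1)
          (acc ++ [((p : Int), String.ofList (PySem.List.slice cs (some (p : Int)) (some (k : Int))))])
          hrest.symm (by omega) (by omega) (by simp)]
        have hne : (cs.drop p).take (k - p) ≠ [] := by
          intro h
          rw [h] at hrunlen
          simp at hrunlen; omega
        rw [PySem.List.slice_natCast]
        conv_rhs => rw [hsplit, altGo_run_sep seps (p : Int) _ rest c hne hinv hc]
        have hidx : (p : Int) + (((cs.drop p).take (k - p)).length : Int) + 1 = ((k + 1 : Nat) : Int) := by
          rw [hrunlen]
          push_cast [Nat.cast_sub (Nat.le_of_lt hpklt)]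
          ring
        rw [hidx, hrest]
        simp
      · rw [if_neg (by exact_mod_cast hpklt)]
        have hpk' : p = k := by omega
        have hcast : ((k : Int) + 1) = ((k + 1 : Nat) : Int) := by push_cast; ring
        rw [hcast, ih (k + 1) (k + 1) acc hrest.symm (by omega) (by omega) (by simp)]
        subst hpk'
        conv_rhs => rw [← hl, altGo_cons, if_pos hc]
        rw [hcast, hrest]
    · simp only [aStep, if_neg hc]
      have hinv' : ∀ x ∈ (cs.drop p).take (k + 1 - p), x ∉ seps := by
        have htake1 : (cs.drop p).take (k + 1 - p) = (cs.drop p).take (k - p) ++ [c] := by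
          conv_lhs => rw [hsplit]
          rw [show k + 1 - p = ((cs.drop p).take (k - p)).length + 1 from by omega,
              List.take_append]
          simp
        rw [htake1]
        intro x hx
        rcases List.mem_append.mp hx with h | h
        · exact hinv x h
        · simp at h; subst h; exact hc
      have hcast : ((k : Int) + 1) = ((k + 1 : Nat) : Int) := by push_cast; ring
      rw [hcast, ih (k + 1) p acc hrest.symm (by omega) (by omega) hinv']

-- ===== VERDICT (by name: the statement is the Claim_ definition above) =====
theorem split_with_offset_spec : Claim_equal_split_with_offset := by
  intro s sep _
  unfold Spec_split_with_offset split_with_offset split_with_offset_alt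
  have h := key s.toList sep.toList s.toList 0 0 [] (by simp) (by omega) (by omega) (by simp)
  simpa using h
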